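-- pv_equiv track=rewrite | github.com/MX-Solo/Cryptography-Implementation-Hill-DES-and-AES-Ciphers | hill_cipher.py | determinant_mod26
-- ===== SOURCE A (Python) =====
-- def determinant_mod26(matrix):
--
--    # محاسبه دترمینان ماتریس در مدول 26
--
--     n = len(matrix)
--     if n == 1:
--         return matrix[0][0] % 26
--     elif n == 2:
--         det = (matrix[0][0] * matrix[1][1] - matrix[0][1] * matrix[1][0]) % 26
--         return det if det >= 0 else det + 26
--     else:
--         det = 0
--         for j in range(n):
--             minor = [[matrix[i][k] for k in range(n) if k != j]
--                      for i in range(1, n)]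
--             cofactor = ((-1) ** j) * matrix[0][j] * determinant_mod26(minor)
--             det += cofactor
--         det = det % 26
--         return det if det >= 0 else det + 26
-- ===== SOURCE B (Python) =====
-- def determinant_mod26(matrix):
--     # Subset dynamic programming (O(2^n * n)) instead of A's O(n!) cofactor recursion:
--     # dp[mask] = determinant of the bottom popcount(mask) rows restricted to the columns in mask.
--     n = len(matrix)
--     size = 1 << n
--     dp = [0] * size
--     dp[0] = 1
--     for mask in range(1, size):
--         i = n - bin(mask).count('1')
--         sign = 1
--         acc = 0
--         for j in range(n):
--             if (mask >> j) & 1: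
--                 acc += sign * matrix[i][j] * dp[mask ^ (1 << j)]
--                 sign = -sign
--         dp[mask] = acc
--     return dp[size - 1] % 26
-- ===== Notes on version B (the rewrite author's own statement) =====
-- stated objective: faster
-- what changed: Replaces A's recursive cofactor expansion along the first row (building explicit minor matrices, O(n!)) with a bottom-up subset dynamic program over column bitmasks: dp[mask] = determinant of the bottom popcount(mask) rows restricted to the columns in mask, filled in one pass over masks.
-- outside the precondition, e.g. on determinant_mod26([]): A returns 0, B returns 1
import Mathlib
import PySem

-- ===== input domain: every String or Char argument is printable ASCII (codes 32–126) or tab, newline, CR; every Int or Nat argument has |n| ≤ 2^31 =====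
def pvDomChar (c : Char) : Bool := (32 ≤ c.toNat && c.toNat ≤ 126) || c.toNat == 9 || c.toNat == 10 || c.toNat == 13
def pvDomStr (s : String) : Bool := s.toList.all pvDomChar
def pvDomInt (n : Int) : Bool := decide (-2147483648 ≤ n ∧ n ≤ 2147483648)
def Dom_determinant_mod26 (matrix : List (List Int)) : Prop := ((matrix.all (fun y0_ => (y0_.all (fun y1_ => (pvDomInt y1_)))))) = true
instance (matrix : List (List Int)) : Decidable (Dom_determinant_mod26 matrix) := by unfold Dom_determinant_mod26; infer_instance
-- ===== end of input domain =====

-- B replaces A's O(n!) recursive cofactor expansion by a subset-DP over column bitmasks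
-- (O(2^n·n)); equivalence is proved on nonempty matrices whose rows all have length ≥ n.

-- ===== PORT A =====
-- A is recursive on minors of strictly smaller size; we port it with a fuel parameter equal
-- to the recursion depth (the matrix size): fuel = matrix.length always suffices, so the
-- fuel-0 branch is never reached on the claimed inputs.  All indices accessed are in range
-- under Pre_, so Python's matrix[i][k] is ported as getD _ _ 0 (exact there).
def detA_fuel : Nat → List (List Int) → Int
  | 0, _ => 0
  | fuel+1, matrix =>
    let n := matrix.length
    if n = 1 then
      PySem.Int.mod ((matrix.getD 0 []).getD 0 0) 26
    else if n = 2 then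
      let det := PySem.Int.mod
        ((matrix.getD 0 []).getD 0 0 * (matrix.getD 1 []).getD 1 0
          - (matrix.getD 0 []).getD 1 0 * (matrix.getD 1 []).getD 0 0) 26
      if det ≥ 0 then det else det + 26
    else
      -- det = 0; for j in range(n): minor = …; det += cofactor
      let det := (List.range n).foldl (fun acc j =>
        let minor := (matrix.drop 1).map (fun row =>
          ((List.range n).filter (fun k => k != j)).map (fun k => row.getD k 0))
        acc + (-1 : Int) ^ j * ((matrix.getD 0 []).getD j 0) * detA_fuel fuel minor) 0
      let det2 := PySem.Int.mod det 26
      if det2 ≥ 0 then det2 else det2 + 26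

def determinant_mod26 (matrix : List (List Int)) : Int :=
  detA_fuel matrix.length matrix

-- ===== PORT B =====
-- bin(mask).count('1')
def pyPopcount (m : Nat) : Nat :=
  if m = 0 then 0 else m % 2 + pyPopcount (m / 2)
decreasing_by exact Nat.div_lt_self (Nat.pos_of_ne_zero (by assumption)) (by norm_num)

-- Python preallocates dp = [0]*size and assigns dp[mask] in increasing mask order, reading
-- only indices < mask; we build the same values by pushing onto an Array in the same order.
def determinant_mod26_alt (matrix : List (List Int)) : Int :=
  let n := matrix.length
  let size := 2 ^ n
  let dp := (List.range' 1 (size - 1)).foldl (fun (dp : Array Int) mask =>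
    let i := n - pyPopcount mask
    let r := (List.range n).foldl (fun (p : Int × Int) j =>
      if (mask >>> j) &&& 1 = 1 then
        (-p.1, p.2 + p.1 * ((matrix.getD i []).getD j 0) * dp.getD (mask ^^^ (1 <<< j)) 0)
      else p) (1, 0)
    dp.push r.2) #[(1 : Int)]
  PySem.Int.mod (dp.getD (size - 1) 0) 26

-- ===== PRECONDITION & SPEC =====
-- Pre_ excludes (a) matrices with a row shorter than the number of rows, on which A raises
-- IndexError, and (b) the empty matrix — a degenerate input on which A's 0 (an empty cofactor
-- sum) and B's 1 (the standard 0×0-determinant convention) are both defensible.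
def Pre_determinant_mod26 (matrix : List (List Int)) : Prop :=
  1 ≤ matrix.length ∧ ∀ row ∈ matrix, matrix.length ≤ row.length
instance (matrix : List (List Int)) : Decidable (Pre_determinant_mod26 matrix) := by
  unfold Pre_determinant_mod26; infer_instance

def pvWitness_determinant_mod26 : List (List Int) := [[3, 2], [5, 7]]

def Spec_determinant_mod26 (matrix : List (List Int)) (out : Int) : Prop :=
  out = determinant_mod26_alt matrix
instance (matrix : List (List Int)) (out : Int) : Decidable (Spec_determinant_mod26 matrix out) := by
  unfold Spec_determinant_mod26; infer_instance

-- ===== CLAIM (what is proved, stated in full; the proofs are below) =====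
def Claim_equal_determinant_mod26 : Prop := ∀ (matrix : List (List Int)), Dom_determinant_mod26 matrix → Pre_determinant_mod26 matrix → Spec_determinant_mod26 matrix (determinant_mod26 matrix)

-- ===== LEMMAS AND PROOFS =====

-- Reference function: determinant of `rows` restricted to the (nodup) column list `cols`,
-- by Laplace expansion along the first row.
def detCols : List (List Int) → List Nat → Int
  | [], _ => 1
  | r :: rs, cols =>
    ((List.range cols.length).map (fun t =>
      (-1 : Int) ^ t * r.getD (cols.getD t 0) 0 *
        detCols rs (cols.filter (fun k => k != cols.getD t 0)))).sum

-- ---- generic small lemmas ----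

theorem pv_sum_mod (l : List Nat) (c d : Nat → Int) :
    ((l.map (fun j => c j * (d j % 26))).sum) % 26 = ((l.map (fun j => c j * d j)).sum) % 26 := by
  induction l with
  | nil => rfl
  | cons x xs ih =>
    simp only [List.map_cons, List.sum_cons]
    have h1 : (d x % 26) ≡ d x [ZMOD 26] := Int.emod_emod_of_dvd _ dvd_rfl
    have h2 : (xs.map (fun j => c j * (d j % 26))).sum ≡ (xs.map (fun j => c j * d j)).sum [ZMOD 26] := ih
    exact (Int.ModEq.add (h1.mul_left (c x)) h2)

theorem pv_getD_push_lt (a : Array Int) (v : Int) (i : Nat) (h : i < a.size) :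
    (a.push v).getD i 0 = a.getD i 0 := by
  simp [Array.getD, h, Nat.lt_succ_of_lt h, Array.getElem_push_lt]

theorem pv_getD_push_eq (a : Array Int) (v : Int) :
    (a.push v).getD a.size 0 = v := by
  simp [Array.getD]

theorem pv_getD_map {α β : Type} (l : List α) (f : α → β) (t : Nat) (dα : α) (dβ : β)
    (h : t < l.length) : (l.map f).getD t dβ = f (l.getD t dα) := by
  have h' : t < (l.map f).length := by simpa using h
  rw [List.getD_eq_getElem _ _ h', List.getElem_map, List.getD_eq_getElem _ _ h]

theorem pv_restrict (rows : List (List Int)) (cols : List Nat) (hc : cols.Nodup) :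
    ∀ idx : List Nat, (∀ t ∈ idx, t < cols.length) →
    detCols (rows.map (fun r => cols.map (fun k => r.getD k 0))) idx
      = detCols rows (idx.map (fun t => cols.getD t 0)) := by
  induction rows with
  | nil => intro idx _; simp [detCols]
  | cons r rs ih =>
    intro idx hb
    simp only [List.map_cons, detCols, List.length_map]
    apply congrArg List.sum
    apply List.map_congr_left
    intro t ht
    have ht' : t < idx.length := List.mem_range.mp ht
    have hj0 : idx.getD t 0 ∈ idx := by
      rw [List.getD_eq_getElem _ _ ht']; exact List.getElem_mem ht'
    have hj0lt : idx.getD t 0 < cols.length := hb _ hj0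
    have e1 : (List.map (fun k => r.getD k 0) cols).getD (idx.getD t 0) 0
        = r.getD (cols.getD (idx.getD t 0) 0) 0 :=
      pv_getD_map cols (fun k => r.getD k 0) _ 0 0 hj0lt
    have e2 : (idx.map (fun t => cols.getD t 0)).getD t 0 = cols.getD (idx.getD t 0) 0 :=
      pv_getD_map idx (fun t => cols.getD t 0) t 0 0 ht'
    rw [e1, e2]
    have e3 : (idx.map (fun t => cols.getD t 0)).filter
          (fun k => k != cols.getD (idx.getD t 0) 0)
        = (idx.filter (fun k => k != idx.getD t 0)).map (fun t => cols.getD t 0) := by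
      rw [List.filter_map]
      congr 1
      apply List.filter_congr
      intro x hx
      simp only [Function.comp]
      by_cases hxe : x = idx.getD t 0
      · simp [hxe]
      · have : cols.getD x 0 ≠ cols.getD (idx.getD t 0) 0 := by
          intro hgeq
          apply hxe
          have hxlt : x < cols.length := hb _ hx
          rw [List.getD_eq_getElem _ _ hxlt, List.getD_eq_getElem _ _ hj0lt] at hgeq
          exact (List.Nodup.getElem_inj_iff hc).mp hgeq
        rw [bne_iff_ne.mpr this, bne_iff_ne.mpr hxe]
    rw [e3, ih _ (fun x hx => hb _ (List.mem_of_mem_filter hx))]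

theorem pv_filter_ne_range_length (n j : Nat) (h : j < n) :
    ((List.range n).filter (fun k => k != j)).length = n - 1 := by
  rw [← List.Nodup.erase_eq_filter List.nodup_range j,
      List.length_erase_of_mem (List.mem_range.mpr h), List.length_range]

theorem pv_map_getD_range (l : List Nat) :
    (List.range l.length).map (fun t => l.getD t 0) = l := by
  apply List.ext_getElem (by simp)
  intro i h1 h2
  simp [List.getElem?_eq_getElem h2]

theorem pv_getD_range (n t : Nat) (h : t < n) : (List.range n).getD t 0 = t := by
  rw [List.getD_eq_getElem _ _ (by simpa using h), List.getElem_range]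

theorem pv_mod26 (x : Int) : PySem.Int.mod x 26 = x % 26 :=
  PySem.Int.mod_eq_emod_of_pos (by norm_num)

theorem pv_A_eq (fuel : Nat) : ∀ matrix : List (List Int), matrix.length ≤ fuel →
    1 ≤ matrix.length →
    detA_fuel fuel matrix = (detCols matrix (List.range matrix.length)) % 26 := by
  induction fuel with
  | zero => intro matrix h1 h2; omega
  | succ fuel ih =>
    intro matrix hle h1
    obtain ⟨r, rs, rfl⟩ : ∃ r rs, matrix = r :: rs := by
      cases matrix with
      | nil => simp at h1
      | cons a b => exact ⟨a, b, rfl⟩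
    by_cases hn1 : (r :: rs).length = 1
    · have hrs : rs = [] := by simpa using hn1
      subst hrs
      simp [detA_fuel, detCols, List.range_succ]
    · by_cases hn2 : (r :: rs).length = 2
      · obtain ⟨r1, hr1⟩ : ∃ r1, rs = [r1] := by
          cases rs with
          | nil => simp at hn2
          | cons a b =>
            cases b with
            | nil => exact ⟨a, rfl⟩
            | cons c d => simp at hn2
        subst hr1
        have hA : detA_fuel (fuel+1) [r, r1]
            = if (r.getD 0 0 * r1.getD 1 0 - r.getD 1 0 * r1.getD 0 0) % 26 ≥ 0
              then (r.getD 0 0 * r1.getD 1 0 - r.getD 1 0 * r1.getD 0 0) % 26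
              else (r.getD 0 0 * r1.getD 1 0 - r.getD 1 0 * r1.getD 0 0) % 26 + 26 := by
          simp [detA_fuel]
        rw [hA, if_pos (Int.emod_nonneg _ (by norm_num))]
        have hD : detCols [r, r1] (List.range 2)
            = r.getD 0 0 * r1.getD 1 0 - r.getD 1 0 * r1.getD 0 0 := by
          simp [detCols, List.range_succ]
          ring
        simp only [List.length_cons, List.length_nil]
        norm_num [hD]
      · -- n ≥ 3
        have hn3 : 3 ≤ (r :: rs).length := by
          simp only [List.length_cons] at *
          omega
        simp only [detA_fuel]
        rw [if_neg hn1, if_neg hn2]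
        simp only [List.getD_cons_zero, List.drop_succ_cons, List.drop_zero, pv_mod26]
        set n := (r :: rs).length with hn
        rw [PySem.List.foldl_add _ (fun j => (-1 : Int) ^ j * (r.getD j 0) *
              detA_fuel fuel (List.map (fun row =>
                List.map (fun k => row.getD k 0)
                  (List.filter (fun k => k != j) (List.range n))) rs)) 0]
        simp only [zero_add]
        have hterm : ∀ j ∈ List.range n,
            (-1 : Int) ^ j * (r.getD j 0) *
              detA_fuel fuel (List.map (fun row =>
                List.map (fun k => row.getD k 0)
                  (List.filter (fun k => k != j) (List.range n))) rs)
            = ((-1 : Int) ^ j * (r.getD j 0)) *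
                ((detCols rs ((List.range n).filter (fun k => k != j))) % 26) := by
          intro j hj
          have hjn : j < n := List.mem_range.mp hj
          have hlen : ((List.range n).filter (fun k => k != j)).length = n - 1 :=
            pv_filter_ne_range_length n j hjn
          have hrs_len : rs.length = n - 1 := by
            simp only [hn, List.length_cons]
            omega
          have hmlen : (List.map (fun row =>
              List.map (fun k => row.getD k 0)
                (List.filter (fun k => k != j) (List.range n))) rs).length
              = n - 1 := by simp [hrs_len]
          rw [ih _ (by rw [hmlen]; omega) (by rw [hmlen]; omega)]
          rw [hmlen]
          rw [show List.range (n-1)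
              = List.range ((List.range n).filter (fun k => k != j)).length by rw [hlen]]
          rw [pv_restrict rs _ (List.Nodup.filter _ List.nodup_range) _
              (fun t ht => List.mem_range.mp ht)]
          rw [pv_map_getD_range]
        rw [List.map_congr_left hterm, pv_sum_mod (List.range n)
              (fun j => (-1 : Int) ^ j * (r.getD j 0))
              (fun j => detCols rs ((List.range n).filter (fun k => k != j)))]
        have hD : detCols (r :: rs) (List.range n)
            = ((List.range n).map (fun j =>
                ((-1 : Int) ^ j * (r.getD j 0)) *
                  detCols rs ((List.range n).filter (fun k => k != j)))).sum := by
          simp only [detCols, List.length_range]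
          apply congrArg List.sum
          apply List.map_congr_left
          intro t ht
          rw [pv_getD_range n t (List.mem_range.mp ht)]
        rw [if_pos (show ((List.range n).map (fun j =>
              ((-1 : Int) ^ j * (r.getD j 0)) *
                detCols rs ((List.range n).filter (fun k => k != j)))).sum % 26 ≥ 0
            from Int.emod_nonneg _ (by norm_num))]
        rw [hD]

-- ---- B side ----

-- the set bits of `mask` below position `n`, in increasing order
def bitsOf (n mask : Nat) : List Nat := (List.range n).filter (fun j => mask.testBit j)

-- dp-value specification: determinant of the bottom popcount(mask) rows on the columns of mask
def gfun (matrix : List (List Int)) (n mask : Nat) : Int :=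
  detCols (matrix.drop (n - pyPopcount mask)) (bitsOf n mask)

theorem pv_cond_testBit (mask j : Nat) : ((mask >>> j) &&& 1 = 1) ↔ mask.testBit j = true := by
  rw [Nat.and_one_is_mod, Nat.testBit_eq_decide_div_mod_eq, Nat.shiftRight_eq_div_pow]
  simp

theorem pv_popcount_eq (n : Nat) : ∀ mask, mask < 2 ^ n →
    pyPopcount mask = (bitsOf n mask).length := by
  induction n with
  | zero =>
    intro mask hm
    have : mask = 0 := by omega
    subst this
    rw [pyPopcount]
    simp [bitsOf]
  | succ n ih =>
    intro mask hm
    by_cases h0 : mask = 0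
    · subst h0
      rw [pyPopcount]
      simp [bitsOf, Nat.zero_testBit]
    · rw [pyPopcount, if_neg h0]
      have hdiv : mask / 2 < 2 ^ n := by
        have : 2 ^ (n+1) = 2 ^ n * 2 := by ring
        omega
      rw [ih _ hdiv]
      simp only [bitsOf, List.range_succ_eq_map, List.filter_cons, List.filter_map,
        ]
      have hcong : (List.range n).filter (Nat.testBit mask ∘ Nat.succ)
          = (List.range n).filter (fun j => (mask / 2).testBit j) :=
        List.filter_congr (fun j _ => by simp [Function.comp, Nat.testBit_add_one])
      rw [hcong]
      have hbit0 : mask.testBit 0 = decide (mask % 2 = 1) := Nat.testBit_zero mask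
      rcases Nat.mod_two_eq_zero_or_one mask with h2 | h2 <;> simp [hbit0, h2]
      omega

theorem pv_bitsOf_xor (n mask j : Nat) (hj : j < n) (hb : mask.testBit j = true) :
    bitsOf n (mask ^^^ (1 <<< j)) = (bitsOf n mask).filter (fun k => k != j) := by
  simp only [bitsOf, List.filter_filter]
  apply List.filter_congr
  intro x hx
  rw [Nat.one_shiftLeft, Nat.testBit_xor, Nat.testBit_two_pow]
  by_cases hxj : x = j
  · subst hxj; simp [hb]
  · simp [hxj, Ne.symm hxj]

theorem pv_xor_lt (mask j : Nat) (hb : mask.testBit j = true) :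
    mask ^^^ (1 <<< j) < mask := by
  rw [Nat.one_shiftLeft]
  apply Nat.lt_of_testBit j
  · simp [Nat.testBit_xor, hb]
  · exact hb
  · intro j' hj'
    simp [Nat.testBit_xor, Nat.ne_of_lt hj']

theorem pv_xor_lt_two_pow (n mask j : Nat) (hm : mask < 2 ^ n) (hj : j < n) :
    mask ^^^ (1 <<< j) < 2 ^ n := by
  rw [Nat.one_shiftLeft]
  exact Nat.xor_lt_two_pow hm (Nat.pow_lt_pow_right (by norm_num) hj)

theorem pv_bitsOf_full (n : Nat) : bitsOf n (2 ^ n - 1) = List.range n := by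
  apply List.filter_eq_self.mpr
  intro x hx
  rw [Nat.testBit_two_pow_sub_one]
  simpa using List.mem_range.mp hx

theorem pv_bitsOf_zero (n : Nat) : bitsOf n 0 = [] := by
  simp [bitsOf, Nat.zero_testBit]

theorem pv_popcount_pos (n mask : Nat) (h1 : 1 ≤ mask) (h2 : mask < 2 ^ n) :
    1 ≤ pyPopcount mask := by
  rw [pv_popcount_eq n mask h2]
  by_contra hc
  have hnil : bitsOf n mask = [] := List.length_eq_zero_iff.mp (by omega)
  have : mask = 0 := by
    apply Nat.eq_of_testBit_eq
    intro i
    rw [Nat.zero_testBit]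
    by_cases hi : i < n
    · by_contra hb
      have : i ∈ bitsOf n mask := by
        simp [bitsOf, List.mem_filter, List.mem_range, hi]
        simpa using hb
      rw [hnil] at this
      simp at this
    · exact Nat.testBit_lt_two_pow (lt_of_lt_of_le h2
        (Nat.pow_le_pow_right (by norm_num) (by omega)))
  omega

theorem pv_inner (mask : Nat) (rowf dpf : Nat → Int) :
    ∀ m, (List.range m).foldl (fun (p : Int × Int) j =>
        if (mask >>> j) &&& 1 = 1 then
          (-p.1, p.2 + p.1 * rowf j * dpf j)
        else p) (1, 0)
      = ((-1 : Int) ^ (bitsOf m mask).length,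
         ((List.range (bitsOf m mask).length).map (fun t =>
            (-1 : Int) ^ t * rowf ((bitsOf m mask).getD t 0) *
              dpf ((bitsOf m mask).getD t 0))).sum) := by
  intro m
  induction m with
  | zero => simp [bitsOf]
  | succ m ih =>
    rw [List.range_succ, List.foldl_append, ih, List.foldl_cons, List.foldl_nil]
    by_cases hb : mask.testBit m
    · rw [if_pos ((pv_cond_testBit mask m).mpr hb)]
      have hbits : bitsOf (m+1) mask = bitsOf m mask ++ [m] := by
        simp [bitsOf, List.range_succ, List.filter_append, hb]
      have hlast : (bitsOf m mask ++ [m]).getD (bitsOf m mask).length 0 = m := by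
        rw [List.getD_append_right _ _ _ _ le_rfl]
        simp
      have hpre : ∀ t ∈ List.range (bitsOf m mask).length,
          (-1 : Int) ^ t * rowf ((bitsOf m mask ++ [m]).getD t 0) *
            dpf ((bitsOf m mask ++ [m]).getD t 0)
          = (-1 : Int) ^ t * rowf ((bitsOf m mask).getD t 0) *
            dpf ((bitsOf m mask).getD t 0) := by
        intro t ht
        rw [List.getD_append _ _ _ _ (List.mem_range.mp ht)]
      rw [hbits, Prod.mk.injEq]
      refine ⟨?_, ?_⟩
      · show -(-1 : Int) ^ (bitsOf m mask).length
            = (-1 : Int) ^ (bitsOf m mask ++ [m]).length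
        simp only [List.length_append, List.length_cons, List.length_nil]
        rw [pow_succ]
        ring
      · show _ + (-1 : Int) ^ (bitsOf m mask).length * rowf m * dpf m = _
        simp only [List.length_append, List.length_cons, List.length_nil, List.range_succ,
          List.map_append, List.sum_append, List.map_cons, List.map_nil, List.sum_cons,
          List.sum_nil, hlast]
        rw [List.map_congr_left hpre]
        ring
    · rw [if_neg (by rw [pv_cond_testBit]; simpa using hb)]
      have hbits : bitsOf (m+1) mask = bitsOf m mask := by
        simp [bitsOf, List.range_succ, List.filter_append, hb]
      rw [hbits]

theorem pv_step (matrix : List (List Int)) (mask : Nat) (dp : Array Int)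
    (h1 : 1 ≤ mask) (h2 : mask < 2 ^ matrix.length)
    (hinv : ∀ m, m < mask → dp.getD m 0 = gfun matrix matrix.length m) :
    ((List.range matrix.length).foldl (fun (p : Int × Int) j =>
      if (mask >>> j) &&& 1 = 1 then
        (-p.1, p.2 + p.1 * ((matrix.getD (matrix.length - pyPopcount mask) []).getD j 0) *
          dp.getD (mask ^^^ (1 <<< j)) 0)
      else p) (1, 0)).2 = gfun matrix matrix.length mask := by
  rw [pv_inner mask (fun j => (matrix.getD (matrix.length - pyPopcount mask) []).getD j 0)
        (fun j => dp.getD (mask ^^^ (1 <<< j)) 0) matrix.length]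
  have hK : pyPopcount mask = (bitsOf matrix.length mask).length :=
    pv_popcount_eq matrix.length mask h2
  have hK1 : 1 ≤ (bitsOf matrix.length mask).length := by
    rw [← hK]; exact pv_popcount_pos matrix.length mask h1 h2
  have hKn : (bitsOf matrix.length mask).length ≤ matrix.length := by
    have := List.length_filter_le (fun j => mask.testBit j) (List.range matrix.length)
    simpa [bitsOf] using this
  have hi_lt : matrix.length - pyPopcount mask < matrix.length := by omega
  have hnodup : (bitsOf matrix.length mask).Nodup := List.Nodup.filter _ List.nodup_range
  rw [gfun, List.drop_eq_getElem_cons hi_lt]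
  simp only [detCols]
  apply congrArg List.sum
  apply List.map_congr_left
  intro t ht
  have ht' : t < (bitsOf matrix.length mask).length := List.mem_range.mp ht
  have hjmem : (bitsOf matrix.length mask).getD t 0 ∈ bitsOf matrix.length mask := by
    rw [List.getD_eq_getElem _ _ ht']; exact List.getElem_mem ht'
  have hjn : (bitsOf matrix.length mask).getD t 0 < matrix.length :=
    List.mem_range.mp (List.mem_of_mem_filter hjmem)
  have hjbit : mask.testBit ((bitsOf matrix.length mask).getD t 0) = true :=
    List.of_mem_filter hjmem
  have e1 : matrix.getD (matrix.length - pyPopcount mask) []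
      = matrix[matrix.length - pyPopcount mask] :=
    List.getD_eq_getElem _ _ hi_lt
  have e2 : dp.getD (mask ^^^ (1 <<< (bitsOf matrix.length mask).getD t 0)) 0
      = gfun matrix matrix.length (mask ^^^ (1 <<< (bitsOf matrix.length mask).getD t 0)) := by
    apply hinv
    exact pv_xor_lt mask _ hjbit
  have e3 : pyPopcount (mask ^^^ (1 <<< (bitsOf matrix.length mask).getD t 0))
      = (bitsOf matrix.length mask).length - 1 := by
    rw [pv_popcount_eq matrix.length _
        (pv_xor_lt_two_pow matrix.length mask _ h2 hjn),
      pv_bitsOf_xor matrix.length mask _ hjn hjbit,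
      ← List.Nodup.erase_eq_filter hnodup, List.length_erase_of_mem hjmem]
  have e4 : matrix.length - ((bitsOf matrix.length mask).length - 1)
      = (matrix.length - pyPopcount mask) + 1 := by omega
  rw [e1, e2, gfun, e3, e4,
    pv_bitsOf_xor matrix.length mask _ hjn hjbit]


theorem pv_dp_loop (matrix : List (List Int)) :
    ∀ (len start : Nat) (dp : Array Int), 1 ≤ start → start + len = 2 ^ matrix.length →
    dp.size = start →
    (∀ m, m < start → dp.getD m 0 = gfun matrix matrix.length m) →
    (((List.range' start len).foldl (fun (dp : Array Int) mask =>
        dp.push (((List.range matrix.length).foldl (fun (p : Int × Int) j =>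
          if (mask >>> j) &&& 1 = 1 then
            (-p.1, p.2 + p.1 * ((matrix.getD (matrix.length - pyPopcount mask) []).getD j 0) *
              dp.getD (mask ^^^ (1 <<< j)) 0)
          else p) (1, 0)).2)) dp).size = 2 ^ matrix.length
     ∧ ∀ m, m < 2 ^ matrix.length →
        ((List.range' start len).foldl (fun (dp : Array Int) mask =>
          dp.push (((List.range matrix.length).foldl (fun (p : Int × Int) j =>
            if (mask >>> j) &&& 1 = 1 then
              (-p.1, p.2 + p.1 * ((matrix.getD (matrix.length - pyPopcount mask) []).getD j 0) *
                dp.getD (mask ^^^ (1 <<< j)) 0)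
            else p) (1, 0)).2)) dp).getD m 0 = gfun matrix matrix.length m) := by
  intro len
  induction len with
  | zero =>
    intro start dp hs1 hs2 hsz hinv
    simp only [List.range'_zero, List.foldl_nil]
    refine ⟨by rw [hsz]; omega, ?_⟩
    intro m hm
    exact hinv m (by omega)
  | succ len ih =>
    intro start dp hs1 hs2 hsz hinv
    rw [List.range'_succ, List.foldl_cons]
    apply ih (start + 1) _ (by omega) (by omega) (by simp [hsz])
    intro m hm
    by_cases hmlt : m < start
    · rw [← hsz] at hmlt
      rw [pv_getD_push_lt _ _ _ hmlt]
      exact hinv m (by omega)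
    · have hmeq : m = start := by omega
      subst hmeq
      rw [← hsz, pv_getD_push_eq]
      rw [hsz]
      exact pv_step matrix m dp hs1 (by omega) (fun m' hm' => hinv m' hm')

theorem pv_B_eq (matrix : List (List Int)) :
    determinant_mod26_alt matrix = (detCols matrix (List.range matrix.length)) % 26 := by
  simp only [determinant_mod26_alt]
  have hpow : 1 ≤ 2 ^ matrix.length := Nat.one_le_two_pow
  obtain ⟨hsz, hval⟩ := pv_dp_loop matrix (2 ^ matrix.length - 1) 1 #[(1 : Int)]
    le_rfl (by omega) rfl
    (by
      intro m hm
      have hm0 : m = 0 := by omega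
      subst hm0
      show (1 : Int) = gfun matrix matrix.length 0
      rw [gfun, pv_bitsOf_zero]
      have : pyPopcount 0 = 0 := by rw [pyPopcount]; simp
      rw [this, Nat.sub_zero, List.drop_length]
      rfl)
  rw [hval (2 ^ matrix.length - 1) (by omega), pv_mod26, gfun]
  have hpc : pyPopcount (2 ^ matrix.length - 1) = matrix.length := by
    rw [pv_popcount_eq matrix.length _ (by omega), pv_bitsOf_full, List.length_range]
  rw [hpc, Nat.sub_self, List.drop_zero, pv_bitsOf_full]

-- ===== VERDICT (by name: the statement is the Claim_ definition above) =====
theorem determinant_mod26_spec : Claim_equal_determinant_mod26 := by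
  intro matrix _ hpre
  unfold Spec_determinant_mod26
  rw [determinant_mod26, pv_A_eq matrix.length matrix le_rfl hpre.1,
      pv_B_eq matrix]
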